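-- pv_equiv track=rewrite | github.com/BBATools/PreservationWorkbench | bin/PWB/verify_copies.py | uniqueDirs
-- ===== SOURCE A (Python) =====
-- def uniqueDirs(dirs):
--     for dirA in list(dirs):
--         for dirB in list(dirs):
--             if dirB in dirA and dirB != dirA:
--                 dirs.pop(dirs.index(dirB))
--                 return uniqueDirs(dirs)
--             elif dirA in dirB and dirB != dirA:
--                 dirs.pop(dirs.index(dirA))
--                 return uniqueDirs(dirs)
--     return dirs
-- ===== SOURCE B (Python) =====
-- def uniqueDirs(dirs):
--     # Sort the distinct values by length, longest first; a value is removed iff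
--     # it is a proper substring of some surviving (kept) longer value --
--     # containment is transitive, so comparing against kept values suffices.
--     kept = []
--     removed = set()
--     for s in sorted(dict.fromkeys(dirs), key=len, reverse=True):
--         if any(s in k and s != k for k in kept):
--             removed.add(s)
--         else:
--             kept.append(s)
--     dirs[:] = [d for d in dirs if d not in removed]
--     return dirs
-- ===== Notes on version B (the rewrite author's own statement) =====
-- stated objective: faster
-- what changed: A repeatedly rescans all O(n^2) pairs from scratch after each single removal and recurses; B makes one pass over the distinct values sorted by length descending, keeping a value unless it is a proper substring of an already-kept longer value (transitivity makes that sufficient), then filters the original list once.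
import Mathlib
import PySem

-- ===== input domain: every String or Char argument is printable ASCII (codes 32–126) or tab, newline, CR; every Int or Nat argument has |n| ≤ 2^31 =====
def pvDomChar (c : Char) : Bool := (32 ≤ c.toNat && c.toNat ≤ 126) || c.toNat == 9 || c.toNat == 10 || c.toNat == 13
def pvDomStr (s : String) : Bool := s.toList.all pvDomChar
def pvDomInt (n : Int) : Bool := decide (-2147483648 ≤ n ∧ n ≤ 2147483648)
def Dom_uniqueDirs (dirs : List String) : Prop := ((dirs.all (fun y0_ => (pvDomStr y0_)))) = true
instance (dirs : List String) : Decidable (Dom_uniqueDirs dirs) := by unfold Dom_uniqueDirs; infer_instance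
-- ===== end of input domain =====

-- B changes the algorithm (one length-sorted pass over distinct values instead of
-- restart-on-every-removal recursion); both A and B mutate `dirs` in place to the
-- same final list in Python — the equivalence proved here is about the return value.

-- ===== PORT A =====
-- inner 'for dirB in list(dirs)' loop: returns the value A pops, if any
def udInner (dirA : String) : List String → Option String
  | [] => none
  | dirB :: rest =>
    if PySem.Str.isIn dirB dirA && dirB != dirA then some dirB
    else if PySem.Str.isIn dirA dirB && dirB != dirA then some dirA
    else udInner dirA rest

-- outer 'for dirA in list(dirs)' loop (full = the snapshot the inner loop scans)
def udOuter (full : List String) : List String → Option String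
  | [] => none
  | dirA :: rest =>
    match udInner dirA full with
    | some v => some v
    | none => udOuter full rest

-- needed for termination of uniqueDirs (cited by name in decreasing_by)
theorem remove?_length_lt {xs ys : List String} {v : String}
    (h : PySem.List.remove? xs v = some ys) : ys.length < xs.length := by
  induction xs generalizing ys with
  | nil =>
    rw [(PySem.List.remove?_eq_none_iff ([] : List String) v).mpr (by simp)] at h
    cases h
  | cons x t ih =>
    by_cases hx : x = v
    · subst hx
      rw [PySem.List.remove?_cons_self] at h
      cases h
      simp
    · rw [PySem.List.remove?_cons_of_ne t hx] at h
      cases ht : PySem.List.remove? t v with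
      | none => rw [ht] at h; cases h
      | some zs =>
        rw [ht] at h
        cases h
        simpa using Nat.succ_lt_succ (ih ht)

def uniqueDirs (dirs : List String) : List String :=
  match udOuter dirs dirs with
  | some v =>
    -- dirs.pop(dirs.index(v)) removes the first occurrence of v
    match h : PySem.List.remove? dirs v with
    | some dirs' => uniqueDirs dirs'
    | none => dirs      -- unreachable: v is a member of dirs
  | none => dirs
termination_by dirs.length
decreasing_by exact remove?_length_lt h

-- ===== PORT B =====
-- the fold step of B's single pass: keep s unless it is a proper substring of a kept value
def altStep (p : List String × PySem.Set String) (s : String) : List String × PySem.Set String :=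
  if p.1.any (fun k => PySem.Str.isIn s k && s != k) then (p.1, PySem.Set.add p.2 s)
  else (p.1 ++ [s], p.2)

def uniqueDirs_alt (dirs : List String) : List String :=
  let order := PySem.List.sorted (PySem.List.dedup dirs) (fun s => PySem.Str.len s) true
  let kr := order.foldl altStep ([], PySem.Set.empty)
  dirs.filter (fun d => !(PySem.Set.contains kr.2 d))

-- ===== PRECONDITION & SPEC =====
def Spec_uniqueDirs (dirs : List String) (out : List String) : Prop := out = uniqueDirs_alt dirs
instance (dirs : List String) (out : List String) : Decidable (Spec_uniqueDirs dirs out) := by unfold Spec_uniqueDirs; infer_instance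

-- ===== CLAIM (what is proved, stated in full; the proofs are below) =====
def Claim_equal_uniqueDirs : Prop := ∀ (dirs : List String), Dom_uniqueDirs dirs → Spec_uniqueDirs dirs (uniqueDirs dirs)

-- ===== LEMMAS AND PROOFS =====

-- 'd is a proper substring of some other value in dirs' (the removal criterion)
def remB (dirs : List String) (d : String) : Bool :=
  dirs.any (fun w => PySem.Str.isIn d w && d != w)

-- the common normal form both programs compute
def canon (dirs : List String) : List String :=
  dirs.filter (fun d => !remB dirs d)

theorem remB_true_iff (l : List String) (d : String) :
    remB l d = true ↔ ∃ w ∈ l, PySem.Str.isIn d w = true ∧ d ≠ w := by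
  simp [remB, List.any_eq_true, Bool.and_eq_true, bne_iff_ne]

theorem isIn_lt_len {d w : String} (h : PySem.Str.isIn d w = true) (hne : d ≠ w) :
    d.toList.length < w.toList.length := by
  have hinf := (PySem.Str.isIn_iff_infix d w).mp h
  have hle := List.IsInfix.length_le hinf
  rcases Nat.lt_or_ge d.toList.length w.toList.length with h' | h'
  · exact h'
  · exact absurd (String.toList_inj.mp (List.IsInfix.eq_of_length hinf (le_antisymm hle h'))) hne

theorem isIn_trans {a b c : String} (h1 : PySem.Str.isIn a b = true)
    (h2 : PySem.Str.isIn b c = true) : PySem.Str.isIn a c = true :=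
  (PySem.Str.isIn_iff_infix a c).mpr
    (List.IsInfix.trans ((PySem.Str.isIn_iff_infix a b).mp h1) ((PySem.Str.isIn_iff_infix b c).mp h2))

-- ===== A-side: the scan finds a removable value; none found means all values are maximal =====

theorem udInner_none {dirA : String} {full : List String} (h : udInner dirA full = none) :
    ∀ b ∈ full, ¬(PySem.Str.isIn dirA b = true ∧ dirA ≠ b) := by
  induction full with
  | nil => simp
  | cons b rest ih =>
    rw [udInner] at h
    split at h
    · exact absurd h (by simp)
    · split at h
      · exact absurd h (by simp)
      · intro x hx
        rcases List.mem_cons.mp hx with hx | hx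
        · subst hx
          rename_i h1 h2
          intro ⟨hin, hne⟩
          exact h2 (by rw [Bool.and_eq_true]; exact ⟨hin, bne_iff_ne.mpr (Ne.symm hne)⟩)
        · exact ih h x hx

theorem udInner_some {dirA v : String} {full : List String} (h : udInner dirA full = some v) :
    (v = dirA ∨ v ∈ full) ∧ ∃ w, (w = dirA ∨ w ∈ full) ∧ PySem.Str.isIn v w = true ∧ v ≠ w := by
  induction full with
  | nil => rw [udInner] at h; cases h
  | cons b rest ih =>
    rw [udInner] at h
    split at h
    · rename_i hc
      simp only [Bool.and_eq_true, bne_iff_ne] at hc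
      cases h
      exact ⟨Or.inr (by simp), dirA, Or.inl rfl, hc.1, hc.2⟩
    · split at h
      · rename_i hc
        simp only [Bool.and_eq_true, bne_iff_ne] at hc
        cases h
        exact ⟨Or.inl rfl, b, Or.inr (by simp), hc.1, Ne.symm hc.2⟩
      · rcases ih h with ⟨h1, w, hw, hrest⟩
        refine ⟨?_, w, ?_, hrest⟩
        · rcases h1 with h1 | h1
          · exact Or.inl h1
          · exact Or.inr (by simp [h1])
        · rcases hw with hw | hw
          · exact Or.inl hw
          · exact Or.inr (by simp [hw])

theorem udOuter_some {full l : List String} {v : String} (h : udOuter full l = some v)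
    (hsub : ∀ a ∈ l, a ∈ full) : v ∈ full ∧ remB full v = true := by
  induction l with
  | nil => rw [udOuter] at h; cases h
  | cons a rest ih =>
    rw [udOuter] at h
    cases hin : udInner a full with
    | some u =>
      rw [hin] at h
      cases h
      rcases udInner_some hin with ⟨h1, w, hw, hiw, hne⟩
      have ha : a ∈ full := hsub a (by simp)
      have hv : v ∈ full := h1.elim (fun e => by rw [e]; exact ha) id
      have hwf : w ∈ full := hw.elim (fun e => by rw [e]; exact ha) id
      exact ⟨hv, (remB_true_iff full v).mpr ⟨w, hwf, hiw, hne⟩⟩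
    | none =>
      rw [hin] at h
      exact ih h (fun a ha => hsub a (by simp [ha]))

theorem udOuter_none {full l : List String} (h : udOuter full l = none) :
    ∀ a ∈ l, remB full a = false := by
  induction l with
  | nil => simp
  | cons a rest ih =>
    rw [udOuter] at h
    cases hin : udInner a full with
    | some u => rw [hin] at h; cases h
    | none =>
      rw [hin] at h
      intro x hx
      rcases List.mem_cons.mp hx with hx | hx
      · subst hx
        cases hb : remB full x with
        | false => rfl
        | true =>
          rcases (remB_true_iff full x).mp hb with ⟨w, hw, hiw, hne⟩
          exact absurd ⟨hiw, hne⟩ (udInner_none hin w hw)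
      · exact ih h x hx

-- removing a removable value does not change which values are removable
theorem remB_erase {dirs : List String} {v : String} (hv : remB dirs v = true) :
    ∀ d, remB (dirs.erase v) d = remB dirs d := by
  intro d
  cases hb : remB dirs d with
  | false =>
    cases he : remB (dirs.erase v) d with
    | false => rfl
    | true =>
      rcases (remB_true_iff _ d).mp he with ⟨w, hw, hiw, hne⟩
      rw [(remB_true_iff dirs d).mpr ⟨w, List.mem_of_mem_erase hw, hiw, hne⟩] at hb
      cases hb
  | true =>
    rcases (remB_true_iff _ d).mp hb with ⟨w, hw, hiw, hne⟩
    apply (remB_true_iff _ d).mpr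
    by_cases hwv : w = v
    · subst hwv
      rcases (remB_true_iff _ w).mp hv with ⟨u, hu, hiu, hneu⟩
      have hdu : PySem.Str.isIn d u = true := isIn_trans hiw hiu
      have hlen : d.toList.length < u.toList.length :=
        lt_trans (isIn_lt_len hiw hne) (isIn_lt_len hiu hneu)
      have hdneu : d ≠ u := fun hq => by rw [hq] at hlen; omega
      exact ⟨u, (List.mem_erase_of_ne (Ne.symm hneu)).mpr hu, hdu, hdneu⟩
    · exact ⟨w, (List.mem_erase_of_ne hwv).mpr hw, hiw, hne⟩

theorem canon_erase {dirs : List String} {v : String} (hv : remB dirs v = true) :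
    canon (dirs.erase v) = canon dirs := by
  unfold canon
  have h1 : (dirs.erase v).filter (fun d => !remB (dirs.erase v) d)
      = (dirs.erase v).filter (fun d => !remB dirs d) := by
    apply List.filter_congr
    intro d _
    rw [remB_erase hv]
  rw [h1, ← List.erase_filter]
  exact List.erase_of_not_mem (by simp [List.mem_filter, hv])

theorem A_canon : ∀ dirs, uniqueDirs dirs = canon dirs := by
  intro dirs
  induction dirs using uniqueDirs.induct with
  | case1 dirs v hout dirs' hrm ih =>
    rcases udOuter_some hout (fun a ha => ha) with ⟨hv, hremv⟩
    have hstep : uniqueDirs dirs = uniqueDirs dirs' := by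
      rw [uniqueDirs, hout]
      split
      · rename_i x heq
        cases heq
        split
        · rename_i y heq2
          rw [hrm] at heq2
          cases heq2
          rfl
        · rename_i heq2
          rw [hrm] at heq2
          cases heq2
      · rename_i heq
        cases heq
    have hdirs' : dirs' = dirs.erase v := by
      have h2 := PySem.List.remove?_eq_some_erase dirs v hv
      rw [h2] at hrm
      exact (Option.some_inj.mp hrm).symm
    rw [hstep, ih, hdirs', canon_erase hremv]
  | case2 dirs v hout hrm =>
    rcases udOuter_some hout (fun a ha => ha) with ⟨hv, _⟩
    rw [PySem.List.remove?_eq_some_erase dirs v hv] at hrm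
    cases hrm
  | case3 dirs hout =>
    rw [uniqueDirs, hout]
    symm
    apply List.filter_eq_self.mpr
    intro d hd
    simp [udOuter_none hout d hd]

-- ===== B-side: invariant of the single length-descending pass =====

theorem foldInv (dirs : List String) :
    ∀ (l : List String) (kept : List String) (removed : PySem.Set String),
    l.Pairwise (fun a b => PySem.Str.len b ≤ PySem.Str.len a) →
    (∀ s ∈ l, s ∈ dirs) →
    (∀ w ∈ dirs, w ∉ l → w ∈ kept ∨ w ∈ removed) →
    (∀ k ∈ kept, k ∈ dirs ∧ remB dirs k = false) →
    (∀ r ∈ removed, ∃ k ∈ kept, PySem.Str.isIn r k = true ∧ r ≠ k) →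
    ∀ d ∈ dirs, ((d ∈ (l.foldl altStep (kept, removed)).2) ↔ remB dirs d = true) := by
  intro l
  induction l with
  | nil =>
    intro kept removed _ _ hplaced hkept hrem d hd
    simp only [List.foldl_nil]
    constructor
    · intro hdr
      rcases hrem d hdr with ⟨k, hk, hik, hne⟩
      exact (remB_true_iff dirs d).mpr ⟨k, (hkept k hk).1, hik, hne⟩
    · intro hremd
      rcases hplaced d hd (by simp) with hk | hr
      · rw [(hkept d hk).2] at hremd; cases hremd
      · exact hr
  | cons s tail ih =>
    intro kept removed hpw hsub hplaced hkept hrem d hd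
    simp only [List.foldl_cons]
    have hlonger : ∀ w ∈ dirs, s.toList.length < w.toList.length → w ∈ kept ∨ w ∈ removed := by
      intro w hw hlw
      apply hplaced w hw
      intro hwl
      rcases List.mem_cons.mp hwl with h | h
      · subst h; omega
      · have := (List.pairwise_cons.mp hpw).1 w h
        rw [PySem.Str.len_eq, PySem.Str.len_eq] at this
        omega
    unfold altStep
    by_cases hc : kept.any (fun k => PySem.Str.isIn s k && s != k) = true
    · rw [if_pos hc]
      apply ih kept (removed.add s) hpw.tail (fun x hx => hsub x (by simp [hx])) ?_ hkept ?_ d hd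
      · intro w hw hwt
        by_cases hws : w = s
        · subst hws; exact Or.inr ((PySem.Set.mem_add removed w w).mpr (Or.inr rfl))
        · rcases hplaced w hw (by simp [hwt, hws]) with h | h
          · exact Or.inl h
          · exact Or.inr ((PySem.Set.mem_add removed s w).mpr (Or.inl h))
      · intro r hr
        rcases (PySem.Set.mem_add removed s r).mp hr with h | h
        · exact hrem r h
        · subst h
          rcases List.any_eq_true.mp hc with ⟨k, hk, hik⟩
          rw [Bool.and_eq_true, bne_iff_ne] at hik
          exact ⟨k, hk, hik.1, hik.2⟩
    · rw [if_neg hc]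
      have hsdirs : s ∈ dirs := hsub s (by simp)
      have hsrem : remB dirs s = false := by
        cases hb : remB dirs s with
        | false => rfl
        | true =>
          exfalso
          rcases (remB_true_iff dirs s).mp hb with ⟨w, hw, hiw, hne⟩
          have hlw : s.toList.length < w.toList.length := isIn_lt_len hiw hne
          rcases hlonger w hw hlw with hk | hr
          · exact hc (List.any_eq_true.mpr ⟨w, hk, by
              rw [Bool.and_eq_true, bne_iff_ne]; exact ⟨hiw, hne⟩⟩)
          · rcases hrem w hr with ⟨k, hk, hik, hnek⟩
            have hsk : PySem.Str.isIn s k = true := isIn_trans hiw hik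
            have hlk : s.toList.length < k.toList.length := lt_trans hlw (isIn_lt_len hik hnek)
            have hnesk : s ≠ k := fun hq => by rw [hq] at hlk; omega
            exact hc (List.any_eq_true.mpr ⟨k, hk, by
              rw [Bool.and_eq_true, bne_iff_ne]; exact ⟨hsk, hnesk⟩⟩)
      apply ih (kept ++ [s]) removed hpw.tail (fun x hx => hsub x (by simp [hx])) ?_ ?_ ?_ d hd
      · intro w hw hwt
        by_cases hws : w = s
        · subst hws; exact Or.inl (by simp)
        · rcases hplaced w hw (by simp [hwt, hws]) with h | h
          · exact Or.inl (by simp [h])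
          · exact Or.inr h
      · intro k hk
        rcases List.mem_append.mp hk with h | h
        · exact hkept k h
        · rw [List.mem_singleton] at h
          subst h
          exact ⟨hsdirs, hsrem⟩
      · intro r hr
        rcases hrem r hr with ⟨k, hk, hrest⟩
        exact ⟨k, by simp [hk], hrest⟩

theorem B_canon : ∀ dirs, uniqueDirs_alt dirs = canon dirs := by
  intro dirs
  unfold uniqueDirs_alt canon
  apply List.filter_congr
  intro d hd
  have hmem : ∀ x, x ∈ PySem.List.sorted (PySem.List.dedup dirs) (fun s => PySem.Str.len s) true ↔ x ∈ dirs := by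
    intro x
    rw [PySem.List.mem_sorted, PySem.List.mem_dedup]
  have hinv := foldInv dirs (PySem.List.sorted (PySem.List.dedup dirs) (fun s => PySem.Str.len s) true)
    [] PySem.Set.empty
    (PySem.List.sorted_pairwise_rev _ _)
    (fun x hx => (hmem x).mp hx)
    (fun w hw hwl => absurd ((hmem w).mpr hw) hwl)
    (by simp)
    (by simp [PySem.Set.empty])
    d hd
  congr 1
  rw [Bool.eq_iff_iff]
  rw [PySem.Set.contains_iff]
  exact hinv

-- ===== VERDICT (by name: the statement is the Claim_ definition above) =====
theorem uniqueDirs_spec : Claim_equal_uniqueDirs := by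
  intro dirs _
  unfold Spec_uniqueDirs
  rw [A_canon, B_canon]
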